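-- pv_equiv track=rewrite | github.com/cbxgss/qqq | src/startup/show.py | static
-- ===== SOURCE A (Python) =====
-- def static(id2acc: dict):
--     right, wrong = [], []
--     for id, acc in id2acc.items():
--         if acc == 1:
--             right.append(id)
--         else:
--             wrong.append(id)
--     right.sort()
--     wrong.sort()
--     return right, wrong
-- ===== SOURCE B (Python) =====
-- def static(id2acc: dict):
--     order = sorted(id2acc, key=lambda k: (id2acc[k] != 1, k))
--     cut = sum(v == 1 for v in id2acc.values())
--     return order[:cut], order[cut:]
-- ===== Notes on version B (the rewrite author's own statement) =====
-- stated objective: alternative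
-- what changed: A builds two buckets with a branch in a loop and then sorts each; B never partitions: it performs ONE sort of the keys under the composite key (acc != 1, key), counts the right answers, and slices the single sorted sequence at that count, so the two buckets are a prefix and a suffix of one list.
import Mathlib
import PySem

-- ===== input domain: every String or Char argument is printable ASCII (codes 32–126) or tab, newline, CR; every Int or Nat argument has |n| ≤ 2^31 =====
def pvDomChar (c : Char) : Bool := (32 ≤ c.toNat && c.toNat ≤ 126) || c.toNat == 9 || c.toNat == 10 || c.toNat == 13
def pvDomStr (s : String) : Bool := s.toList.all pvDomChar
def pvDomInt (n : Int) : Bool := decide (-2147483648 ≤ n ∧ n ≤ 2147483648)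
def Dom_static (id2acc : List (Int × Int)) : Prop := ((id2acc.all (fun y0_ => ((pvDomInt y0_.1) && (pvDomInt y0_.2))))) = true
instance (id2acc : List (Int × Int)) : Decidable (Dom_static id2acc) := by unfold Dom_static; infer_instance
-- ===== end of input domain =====

-- B never partitions: it sorts the keys ONCE under the composite key (acc != 1, key),
-- counts the right answers, and slices that single sorted sequence at the count.

-- ===== PORT A =====
-- the dict argument: association list normalised to a Python dict (last value wins, first position kept)
def static (id2acc : List (Int × Int)) : List Int × List Int :=
  let d := PySem.Dict.ofList id2acc
  let rw := d.items.foldl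
    (fun (acc : List Int × List Int) p =>
      if p.2 == 1 then (acc.1 ++ [p.1], acc.2) else (acc.1, acc.2 ++ [p.1]))
    ([], [])
  (PySem.List.sorted rw.1 (fun x => x) false, PySem.List.sorted rw.2 (fun x => x) false)

-- ===== PORT B =====
-- the tuple key (id2acc[k] != 1, k) is ported as the sorted2 two-component key
-- (Bool component first: Python's False < True is Lean's Bool order);
-- sum(v == 1 for v in values) is the fold adding the 0/1 indicator;
-- order[:cut] / order[cut:] are PySem slices
def static_alt (id2acc : List (Int × Int)) : List Int × List Int :=
  let d := PySem.Dict.ofList id2acc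
  let order := PySem.List.sorted2 d.keys (fun k => !(d.getD k 0 == 1)) (fun k => k) false
  let cut : Int := d.values.foldl (fun acc v => acc + (if v == 1 then 1 else 0)) 0
  (PySem.List.slice order none (some cut), PySem.List.slice order (some cut) none)

-- ===== PRECONDITION & SPEC =====
def Spec_static (id2acc : List (Int × Int)) (out : List Int × List Int) : Prop := out = static_alt id2acc
instance (id2acc : List (Int × Int)) (out : List Int × List Int) : Decidable (Spec_static id2acc out) := by unfold Spec_static; infer_instance

-- ===== CLAIM (what is proved, stated in full; the proofs are below) =====
def Claim_equal_static : Prop := ∀ (id2acc : List (Int × Int)), Dom_static id2acc → Spec_static id2acc (static id2acc)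

-- ===== LEMMAS AND PROOFS =====

-- A's pair-accumulator partition loop, characterised by filters
lemma foldl_partition {α : Type} (c : α → Bool) (g : α → Int) :
    ∀ (l : List α) (r w : List Int),
      l.foldl (fun (acc : List Int × List Int) p =>
        if c p then (acc.1 ++ [g p], acc.2) else (acc.1, acc.2 ++ [g p])) (r, w)
      = (r ++ (l.filter c).map g, w ++ (l.filter (fun p => !c p)).map g) := by
  intro l
  induction l with
  | nil => intro r w; simp
  | cons p t ih =>
    intro r w
    by_cases h : c p = true
    · simp [List.foldl_cons, h, ih]
    · simp at h
      simp [List.foldl_cons, h, ih]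

-- sorted2 with a (Bool, Int) key pair is sorted under the lexicographic key
lemma sorted2_eq_sorted_lex {α : Type} (xs : List α) (k1 : α → Bool) (k2 : α → Int) :
    PySem.List.sorted2 xs k1 k2 false
      = PySem.List.sorted xs (fun a => toLex (k1 a, k2 a)) false := by
  rw [PySem.List.sorted_eq_foldl_insertBy]
  show xs.foldl (fun acc x => PySem.List.insertBy _ x acc) [] = _
  congr 1
  funext acc x
  congr 1
  funext a b
  have hiff : (toLex (k1 a, k2 a) < toLex (k1 b, k2 b)) ↔
      (k1 a < k1 b ∨ k1 a = k1 b ∧ k2 a < k2 b) := Prod.Lex.lt_iff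
  rw [Bool.eq_iff_iff]
  simp only [Bool.or_eq_true, Bool.and_eq_true, Bool.not_eq_true',
    decide_eq_true_eq, decide_eq_false_iff_not, hiff]
  cases ha : k1 a <;> cases hb : k1 b <;> simp [ha, hb, Bool.lt_iff]

-- B's counting fold is the countP of the list
lemma foldl_count_eq (l : List Int) :
    ∀ (init : Int),
      l.foldl (fun acc v => acc + (if v == 1 then 1 else 0)) init
        = init + (l.countP (fun v => v == 1) : Int) := by
  induction l with
  | nil => intro init; simp
  | cons v t ih =>
    intro init
    rw [List.foldl_cons, ih, List.countP_cons]
    by_cases h : v = 1 <;> simp [h] <;> ring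

-- value-filtered buckets of the items, as key filters (keys of ofList are nodup)
lemma keyfilter_eq (id2acc : List (Int × Int)) (c : Int → Bool) :
    (PySem.Dict.ofList id2acc).keys.filter
        (fun k => c ((PySem.Dict.ofList id2acc).getD k 0))
      = (((PySem.Dict.ofList id2acc).items.filter (fun p => c p.2)).map (·.1)) := by
  set d := PySem.Dict.ofList id2acc with hd
  have hnodup : d.keys.Nodup := PySem.Dict.nodup_keys_ofList id2acc
  have hvals : ∀ p ∈ d.items, (c (d.getD p.1 0)) = c p.2 := by
    intro p hp
    rcases p with ⟨k, v⟩
    have : d.getD k 0 = v := PySem.Dict.getD_of_mem_items d hp hnodup 0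
    rw [this]
  have hkeyfilter : d.keys.filter (fun k => c (d.getD k 0))
      = (d.items.filter (fun p => c (d.getD p.1 0))).map (·.1) := by
    simp only [PySem.Dict.keys]
    exact List.filter_map
  rw [hkeyfilter, List.filter_congr hvals]

-- ===== VERDICT (by name: the statement is the Claim_ definition above) =====
theorem static_spec : Claim_equal_static := by
  intro id2acc _
  unfold Spec_static static static_alt
  simp only
  set d := PySem.Dict.ofList id2acc with hd
  have hnodup : d.keys.Nodup := PySem.Dict.nodup_keys_ofList id2acc
  set R := PySem.List.sorted ((d.items.filter (fun p => p.2 == 1)).map (·.1)) (fun x => x) false with hR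
  set W := PySem.List.sorted ((d.items.filter (fun p => !(p.2 == 1))).map (·.1)) (fun x => x) false with hW
  -- A's value
  rw [foldl_partition (fun p : Int × Int => p.2 == 1) (fun p => p.1)]
  simp only [List.nil_append]
  -- the two key filters
  have hkf1 : d.keys.filter (fun k => d.getD k 0 == 1)
      = ((d.items.filter (fun p => p.2 == 1)).map (·.1)) := by
    have := keyfilter_eq id2acc (fun v => v == 1)
    simpa using this
  have hkf2 : d.keys.filter (fun k => !(d.getD k 0 == 1))
      = ((d.items.filter (fun p => !(p.2 == 1))).map (·.1)) := by
    have := keyfilter_eq id2acc (fun v => !(v == 1))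
    simpa using this
  -- memberships of the buckets
  have hmemR : ∀ a ∈ R, (d.getD a 0 == 1) = true := by
    intro a ha
    have : a ∈ d.keys.filter (fun k => d.getD k 0 == 1) := by
      rw [hkf1]; exact (PySem.List.mem_sorted _ _ _ _).mp ha
    simpa using List.of_mem_filter this
  have hmemW : ∀ a ∈ W, (d.getD a 0 == 1) = false := by
    intro a ha
    have : a ∈ d.keys.filter (fun k => !(d.getD k 0 == 1)) := by
      rw [hkf2]; exact (PySem.List.mem_sorted _ _ _ _).mp ha
    simpa using List.of_mem_filter this
  -- strict key order inside each bucket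
  have hstrict : ∀ (p : Int × Int → Bool),
      (PySem.List.sorted ((d.items.filter p).map (·.1)) (fun x => x) false).Pairwise (fun x y => x < y) := by
    intro p
    have hsub : ((d.items.filter p).map (·.1)).Sublist d.keys :=
      (List.filter_sublist (l := d.items)).map (·.1)
    have hnd : ((d.items.filter p).map (·.1)).Nodup := hsub.nodup hnodup
    have hperm := PySem.List.sorted_perm ((d.items.filter p).map (·.1)) (fun x : Int => x) false
    have hle := PySem.List.sorted_pairwise ((d.items.filter p).map (·.1)) (fun x : Int => x)
    have hne := (hperm.nodup_iff).mpr hnd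
    exact (hle.and hne).imp (fun h => lt_of_le_of_ne h.1 h.2)
  have hRlt : R.Pairwise (fun x y => x < y) := hstrict _
  have hWlt : W.Pairwise (fun x y => x < y) := hstrict _
  -- the single lex-sorted key list is exactly R ++ W
  have horder : PySem.List.sorted2 d.keys (fun k => !(d.getD k 0 == 1)) (fun k => k) false = R ++ W := by
    rw [sorted2_eq_sorted_lex]
    apply PySem.List.sorted_eq_of_perm_of_pairwise_lt
    · -- permutation with the keys
      have h1 : R.Perm (d.keys.filter (fun k => d.getD k 0 == 1)) := by
        rw [hkf1]; exact PySem.List.sorted_perm _ _ _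
      have h2 : W.Perm (d.keys.filter (fun k => !(d.getD k 0 == 1))) := by
        rw [hkf2]; exact PySem.List.sorted_perm _ _ _
      exact (h1.append h2).trans (List.filter_append_perm _ _)
    · -- pairwise lex-increasing
      rw [List.pairwise_append]
      refine ⟨?_, ?_, ?_⟩
      · refine hRlt.imp_of_mem ?_
        intro a b ha hb h
        rw [Prod.Lex.lt_iff]
        right
        simp [hmemR a ha, hmemR b hb, h]
      · refine hWlt.imp_of_mem ?_
        intro a b ha hb h
        rw [Prod.Lex.lt_iff]
        right
        simp [hmemW a ha, hmemW b hb, h]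
      · intro a ha b hb
        rw [Prod.Lex.lt_iff]
        left
        simp [hmemR a ha, hmemW b hb, Bool.lt_iff]
  -- the count equals R's length
  have hcut : d.values.foldl (fun acc v => acc + (if v == 1 then 1 else 0)) 0 = (R.length : Int) := by
    rw [foldl_count_eq]
    have hlen : R.length = (d.items.filter (fun p => p.2 == 1)).length := by
      rw [hR, PySem.List.length_sorted, List.length_map]
    rw [hlen]
    simp [PySem.Dict.values, List.countP_eq_length_filter, List.filter_map, Function.comp_def]
  rw [horder, hcut,
      PySem.List.slice_to _ (by positivity),
      PySem.List.slice_from _ (by positivity)]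
  simp
  constructor <;> rfl
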